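-- pv_equiv track=rewrite | github.com/abhira15/Programming-Challenges-Unit-1-6- | Unit 2/Hartals.py | count_hartals
-- ===== SOURCE A (Python) =====
-- def remove(day):
--     return day%7 == 6 or day%7 == 5
--
-- def count_hartals(days, parties):
--
--     calendar = [0 for _ in range(days)]
--
--     for p in parties:
--         current = p
--         while current <= days:
--             calendar[current-1] = 1
--
--             current += p
--
--     for d in range(days):
--         if remove(d):
--             calendar[d] = 0
--
--     return int(sum(calendar))
-- ===== SOURCE B (Python) =====
-- def count_hartals(days, parties):
--     # one pass over days: count non-weekend day indices whose 1-based day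
--     # number is a multiple of some party's hartal parameter
--     return sum(
--         1
--         for i in range(days)
--         if i % 7 not in (5, 6) and any((i + 1) % p == 0 for p in parties)
--     )
-- ===== Notes on version B (the rewrite author's own statement) =====
-- stated objective: simpler
-- what changed: B replaces A's mutable calendar array (stride-marking per party, then a weekend-zeroing pass, then a sum) with a single generator pass over day indices that counts days passing a divisibility-by-any-party test and a weekday test.
import Mathlib
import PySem

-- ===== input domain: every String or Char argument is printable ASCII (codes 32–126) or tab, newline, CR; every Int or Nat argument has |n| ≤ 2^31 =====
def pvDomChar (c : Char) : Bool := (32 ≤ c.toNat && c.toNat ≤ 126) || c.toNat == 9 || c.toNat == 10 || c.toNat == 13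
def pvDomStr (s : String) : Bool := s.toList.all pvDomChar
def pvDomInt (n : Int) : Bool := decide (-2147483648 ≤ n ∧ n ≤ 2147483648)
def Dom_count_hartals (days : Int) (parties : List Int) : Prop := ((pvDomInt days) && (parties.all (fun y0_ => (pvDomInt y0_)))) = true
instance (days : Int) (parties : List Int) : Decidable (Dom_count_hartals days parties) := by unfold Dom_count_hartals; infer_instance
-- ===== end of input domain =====

-- B replaces A's mutable calendar array (stride-marking per party, weekend zeroing, sum)
-- with a single counting pass over day indices (objective: simpler).

-- ===== PORT A =====
-- helper 'remove' of A
def pyRemove (day : Int) : Bool := PySem.Int.mod day 7 == 6 || PySem.Int.mod day 7 == 5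

-- the inner 'while current <= days' loop of A, made total with fuel
-- (under Pre_ the fuel days.toNat + 1 is always sufficient, see markLoop_getD)
def markLoop : Nat → Int → Int → Int → List Int → List Int
  | 0, _, _, _, cal => cal
  | f + 1, days, p, current, cal =>
    if current ≤ days then
      markLoop f days p (current + p) (PySem.List.pySetD cal (current - 1) 1)
    else cal

def count_hartals (days : Int) (parties : List Int) : Int :=
  let calendar : List Int := (PySem.List.pyRange 0 days 1).map (fun _ => 0)
  let calendar := parties.foldl (fun cal p => markLoop (days.toNat + 1) days p p cal) calendar
  let calendar := (PySem.List.pyRange 0 days 1).foldl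
    (fun cal d => if pyRemove d then PySem.List.pySetD cal d 0 else cal) calendar
  calendar.sum

-- ===== PORT B =====
def count_hartals_alt (days : Int) (parties : List Int) : Int :=
  ((PySem.List.pyRange 0 days 1).countP
    (fun i => !(PySem.Int.mod i 7 == 5 || PySem.Int.mod i 7 == 6)
              && parties.any (fun p => PySem.Int.mod (i + 1) p == 0)) : Nat)

-- ===== PRECONDITION & SPEC =====
-- Pre_ admits exactly the inputs on which A returns: a party value p with p ≤ 0 and
-- p ≤ days makes A loop forever (p = 0) or index the calendar out of range (p < 0).
def Pre_count_hartals (days : Int) (parties : List Int) : Prop :=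
  ∀ p ∈ parties, 0 < p ∨ days < p

instance (days : Int) (parties : List Int) : Decidable (Pre_count_hartals days parties) := by
  unfold Pre_count_hartals; infer_instance

def pvWitness_count_hartals : Int × List Int := (14, [3, 4])

def Spec_count_hartals (days : Int) (parties : List Int) (out : Int) : Prop := out = count_hartals_alt days parties
instance (days : Int) (parties : List Int) (out : Int) : Decidable (Spec_count_hartals days parties out) := by unfold Spec_count_hartals; infer_instance

-- ===== CLAIM (what is proved, stated in full; the proofs are below) =====
def Claim_equal_count_hartals : Prop := ∀ (days : Int) (parties : List Int), Dom_count_hartals days parties → Pre_count_hartals days parties → Spec_count_hartals days parties (count_hartals days parties)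

-- ===== LEMMAS AND PROOFS =====

theorem getD_set_self (xs : List Int) (i : Nat) (v : Int) (h : i < xs.length) :
    (xs.set i v).getD i 0 = v := by
  simp [List.getD, h]

theorem getD_set_ne (xs : List Int) (i j : Nat) (v : Int) (h : i ≠ j) :
    (xs.set i v).getD j 0 = xs.getD j 0 := by
  simp [List.getD, List.getElem?_set_ne h]

theorem length_markLoop (f : Nat) (days p c : Int) (cal : List Int) :
    (markLoop f days p c cal).length = cal.length := by
  induction f generalizing c cal with
  | zero => rfl
  | succ f ih =>
    simp only [markLoop]
    split
    · rw [ih]; exact PySem.List.length_pySetD ..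
    · rfl

theorem markLoop_getD (f : Nat) (days p c : Int) (cal : List Int)
    (hp : 0 < p) (hc : 0 < c) (hfuel : days < (f : Int) * p + c)
    (hlen : (cal.length : Int) = days) (i : Nat) (hi : (i : Int) < days) :
    (markLoop f days p c cal).getD i 0 =
      if c ≤ (i : Int) + 1 ∧ p ∣ ((i : Int) + 1 - c) then 1 else cal.getD i 0 := by
  induction f generalizing c cal with
  | zero =>
    have hne : ¬ (c ≤ (i : Int) + 1 ∧ p ∣ ((i : Int) + 1 - c)) := by
      rintro ⟨h1, -⟩; simp at hfuel; omega
    simp [markLoop, hne]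
  | succ f ih =>
    simp only [markLoop]
    split
    case isTrue hcd =>
      rw [PySem.List.pySetD_of_nonneg _ _ (by omega : (0:Int) ≤ c - 1)]
      have hfuel' : days < (f : Int) * p + (c + p) := by push_cast at hfuel ⊢; nlinarith
      rw [ih (c + p) _ (by omega) hfuel' (by simpa using hlen)]
      by_cases hic : (i : Int) + 1 = c
      · have hidx : (c - 1).toNat = i := by omega
        have hlt : i < cal.length := by omega
        have hfalse : ¬ (c + p ≤ (i : Int) + 1 ∧ p ∣ ((i : Int) + 1 - (c + p))) := by
          rintro ⟨h, -⟩; omega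
        have htrue : c ≤ (i : Int) + 1 ∧ p ∣ ((i : Int) + 1 - c) :=
          ⟨by omega, by rw [show (i : Int) + 1 - c = 0 by omega]; exact dvd_zero p⟩
        rw [if_neg hfalse, if_pos htrue, hidx, getD_set_self _ _ _ hlt]
      · have hne : (c - 1).toNat ≠ i := by omega
        rw [getD_set_ne _ _ _ _ hne]
        have hiff : (c + p ≤ (i : Int) + 1 ∧ p ∣ ((i : Int) + 1 - (c + p))) ↔
            (c ≤ (i : Int) + 1 ∧ p ∣ ((i : Int) + 1 - c)) := by
          constructor
          · rintro ⟨h1, h2⟩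
            refine ⟨by omega, ?_⟩
            rw [show (i : Int) + 1 - c = ((i : Int) + 1 - (c + p)) + p by ring]
            exact dvd_add h2 dvd_rfl
          · rintro ⟨h1, h2⟩
            have hple : p ≤ (i : Int) + 1 - c := Int.le_of_dvd (by omega) h2
            refine ⟨by omega, ?_⟩
            rw [show (i : Int) + 1 - (c + p) = ((i : Int) + 1 - c) - p by ring]
            exact dvd_sub h2 dvd_rfl
        simp only [hiff]
    case isFalse hcd =>
      have hne : ¬ (c ≤ (i : Int) + 1 ∧ p ∣ ((i : Int) + 1 - c)) := by
        rintro ⟨h1, -⟩; omega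
      rw [if_neg hne]

theorem fold_mark_length (days : Int) (l : List Int) (cal : List Int) :
    (l.foldl (fun cal p => markLoop (days.toNat + 1) days p p cal) cal).length = cal.length := by
  induction l generalizing cal with
  | nil => rfl
  | cons p l ih => simp only [List.foldl_cons]; rw [ih, length_markLoop]

theorem fold_mark_getD (days : Int) (l : List Int) (cal : List Int)
    (hl : ∀ p ∈ l, 0 < p) (hlen : (cal.length : Int) = days)
    (i : Nat) (hi : (i : Int) < days) :
    (l.foldl (fun cal p => markLoop (days.toNat + 1) days p p cal) cal).getD i 0 =
      if ∃ p ∈ l, p ∣ ((i : Int) + 1) then 1 else cal.getD i 0 := by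
  induction l generalizing cal with
  | nil => simp
  | cons p l ih =>
    simp only [List.foldl_cons]
    rw [ih _ (fun q hq => hl q (List.mem_cons_of_mem p hq))
        (by rw [length_markLoop]; exact hlen)]
    have hp := hl p (List.mem_cons_self ..)
    have hfuel : days < ((days.toNat + 1 : Nat) : Int) * p + p := by
      have h1 : days ≤ (days.toNat : Int) := Int.self_le_toNat days
      push_cast
      nlinarith
    rw [markLoop_getD _ _ _ _ _ hp hp hfuel hlen i hi]
    have hinner : (p ≤ (i : Int) + 1 ∧ p ∣ ((i : Int) + 1 - p)) ↔ p ∣ ((i : Int) + 1) := by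
      constructor
      · rintro ⟨h1, h2⟩
        rw [show (i : Int) + 1 = ((i : Int) + 1 - p) + p by ring]
        exact dvd_add h2 dvd_rfl
      · intro h
        exact ⟨Int.le_of_dvd (by omega) h, dvd_sub h dvd_rfl⟩
    simp only [hinner]
    by_cases h1 : ∃ q ∈ l, q ∣ ((i : Int) + 1) <;> by_cases h2 : p ∣ ((i : Int) + 1) <;>
      simp [h1, h2]

theorem fold_weekend_length (ds : List Int) (cal : List Int) :
    (ds.foldl (fun cal d => if pyRemove d then PySem.List.pySetD cal d 0 else cal) cal).length
      = cal.length := by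
  induction ds generalizing cal with
  | nil => rfl
  | cons d ds ih =>
    simp only [List.foldl_cons]
    rw [ih]
    split <;> simp [PySem.List.length_pySetD]

theorem fold_weekend_getD (ds : List Int) (cal : List Int)
    (hds : ∀ d ∈ ds, 0 ≤ d ∧ d < (cal.length : Int)) (i : Nat) :
    (ds.foldl (fun cal d => if pyRemove d then PySem.List.pySetD cal d 0 else cal) cal).getD i 0 =
      if (i : Int) ∈ ds ∧ pyRemove i then 0 else cal.getD i 0 := by
  induction ds generalizing cal with
  | nil => simp
  | cons d ds ih =>
    simp only [List.foldl_cons]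
    have hstep_len : (if pyRemove d then PySem.List.pySetD cal d 0 else cal).length
        = cal.length := by split <;> simp [PySem.List.length_pySetD]
    rw [ih _ (fun e he => by rw [hstep_len]; exact hds e (List.mem_cons_of_mem d he))]
    obtain ⟨hd0, hdlt⟩ := hds d (List.mem_cons_self ..)
    by_cases hrm : pyRemove d
    · rw [if_pos hrm, PySem.List.pySetD_of_nonneg _ _ hd0]
      by_cases hid : (i : Int) = d
      · have hidx : d.toNat = i := by omega
        have hlt : i < cal.length := by omega
        have hset : (cal.set d.toNat 0).getD i 0 = 0 := by
          rw [hidx, getD_set_self _ _ _ hlt]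
        have hrm' : pyRemove (i : Int) = true := by rw [hid]; exact hrm
        have hmem : (i : Int) ∈ d :: ds := by rw [hid]; exact List.mem_cons_self ..
        conv_rhs => rw [if_pos ⟨hmem, hrm'⟩]
        split_ifs with hin
        · rfl
        · exact hset
      · have hne : d.toNat ≠ i := by omega
        rw [getD_set_ne _ _ _ _ hne]
        simp only [List.mem_cons, hid, false_or]
    · rw [if_neg hrm]
      by_cases hid : (i : Int) = d
      · have : ¬ pyRemove (i : Int) := by rw [hid]; exact hrm
        simp [this]
      · simp only [List.mem_cons, hid, false_or]

theorem count_hartals_eq (days : Int) (parties : List Int) :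
    count_hartals days parties =
      ((PySem.List.pyRange 0 days 1).foldl
        (fun cal d => if pyRemove d then PySem.List.pySetD cal d 0 else cal)
        (parties.foldl (fun cal p => markLoop (days.toNat + 1) days p p cal)
          ((PySem.List.pyRange 0 days 1).map (fun _ => 0)))).sum := rfl

-- ===== VERDICT (by name: the statement is the Claim_ definition above) =====
theorem count_hartals_spec : Claim_equal_count_hartals := by
  intro days parties _ hpre
  unfold Spec_count_hartals count_hartals_alt
  rw [count_hartals_eq]
  by_cases hd : 0 < days
  · -- under Pre_ every party value is positive when days > 0
    have hpos : ∀ p ∈ parties, 0 < p := by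
      intro p hp; rcases hpre p hp with h | h <;> omega
    have hdn : ((days.toNat : Int)) = days := Int.toNat_of_nonneg (by omega)
    have hcal0 : (PySem.List.pyRange 0 days 1).map (fun _ => (0 : Int))
        = List.replicate days.toNat 0 := by
      rw [List.eq_replicate_iff]
      constructor
      · rw [List.length_map, PySem.List.length_pyRange_one]; norm_num
      · intro b hb
        rw [List.mem_map] at hb
        obtain ⟨-, -, h⟩ := hb
        exact h.symm
    have hlen0 : (((PySem.List.pyRange 0 days 1).map (fun _ => (0 : Int))).length : Int)
        = days := by rw [hcal0, List.length_replicate, hdn]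
    have hlen1 : ((parties.foldl (fun cal p => markLoop (days.toNat + 1) days p p cal)
        ((PySem.List.pyRange 0 days 1).map (fun _ => (0 : Int)))).length : Int) = days := by
      rw [fold_mark_length]; exact hlen0
    set good : Nat → Bool :=
      fun k => (!pyRemove (k : Int)) && decide (∃ p ∈ parties, p ∣ ((k : Int) + 1)) with hgood
    have hcal2 : ((PySem.List.pyRange 0 days 1).foldl
        (fun cal d => if pyRemove d then PySem.List.pySetD cal d 0 else cal)
        (parties.foldl (fun cal p => markLoop (days.toNat + 1) days p p cal)
          ((PySem.List.pyRange 0 days 1).map (fun _ => (0 : Int)))))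
        = (List.range days.toNat).map (fun k => if good k then (1 : Int) else 0) := by
      apply List.ext_getElem
      · rw [fold_weekend_length, fold_mark_length, hcal0, List.length_replicate,
          List.length_map, List.length_range]
      · intro k hk1 hk2
        have hkn : k < days.toNat := by
          rwa [fold_weekend_length, fold_mark_length, hcal0, List.length_replicate] at hk1
        have hki : (k : Int) < days := by omega
        rw [← List.getD_eq_getElem _ 0 hk1, ← List.getD_eq_getElem _ 0 hk2]
        rw [fold_weekend_getD _ _ (fun d hd => by
          rw [PySem.List.mem_pyRange_one] at hd
          exact ⟨hd.1, by rw [hlen1]; exact hd.2⟩) k]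
        rw [fold_mark_getD days parties _ hpos hlen0 k hki]
        have hmem : (k : Int) ∈ PySem.List.pyRange 0 days 1 := by
          rw [PySem.List.mem_pyRange_one]; omega
        have hget : ((List.range days.toNat).map
            (fun k => if good k then (1 : Int) else 0)).getD k 0
            = if good k then (1 : Int) else 0 := by
          rw [List.getD_eq_getElem _ 0 hk2]
          simp
        rw [hget, hcal0, hgood]
        have hrep : (List.replicate days.toNat (0 : Int)).getD k 0 = 0 :=
          List.getD_replicate 0 hkn
        by_cases hrm : pyRemove (k : Int) <;>
          by_cases hex : ∃ p ∈ parties, p ∣ ((k : Int) + 1) <;>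
            simp [hrm, hex, hmem]
    rw [hcal2, PySem.List.sum_map_ite_one_zero good (List.range days.toNat)]
    rw [PySem.List.pyRange_one 0 days, List.countP_map]
    norm_num
    apply List.countP_congr
    intro k hk
    have hm : PySem.Int.mod (k : Int) 7 = (k : Int) % 7 :=
      PySem.Int.mod_eq_emod_of_pos (by norm_num)
    simp only [hgood, Function.comp, Bool.and_eq_true, Bool.not_eq_true',
      decide_eq_true_eq, List.any_eq_true, beq_iff_eq, PySem.Int.mod_eq_zero_iff_dvd,
      pyRemove, Bool.or_eq_false_iff, hm]
    tauto
  · -- days ≤ 0: the range is empty, both sides are 0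
    have hnil : PySem.List.pyRange 0 days 1 = [] :=
      PySem.List.pyRange_one_eq_nil (by omega)
    rw [hnil]
    simp only [List.map_nil, List.foldl_nil]
    have h1 : parties.foldl (fun cal p => markLoop (days.toNat + 1) days p p cal)
        ([] : List Int) = [] :=
      List.length_eq_zero_iff.mp (by simpa using fold_mark_length days parties [])
    rw [h1]
    simp
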